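-- pv_equiv track=rewrite | github.com/ARLbenjamin/Killer_Queen | queen_move.py | left_move
-- ===== SOURCE A (Python) =====
-- def left_move(b, q_p, obs):
--     q_position = list(q_p)
--     m = 0
--     i = q_p[1]
--     while i > 1 :
--         e = 0
--         q_position[1] = (q_position[1]-1)
--         while e < len(obs):
--             if q_position == obs[e] :
--                 i = 1
--             e = e + 1
--         if (not(i == 1)):
--             m = m + 1
--         i = i - 1
--     return m
-- ===== SOURCE B (Python) =====
-- def left_move(b, q_p, obs):
--     start = q_p[1]
--     nearest = 0
--     for o in obs:
--         if len(o) == len(q_p) and 1 <= o[1] < start and nearest < o[1]: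
--             if o == q_p[:1] + [o[1]] + q_p[2:]:
--                 nearest = o[1]
--     return max(start - 1 - nearest, 0)
-- ===== Notes on version B (the rewrite author's own statement) =====
-- stated objective: faster
-- what changed: Replaced the square-by-square leftward ray walk (outer loop over columns, inner scan of obs per column) with a single pass over obs that finds the nearest blocking obstacle column by a filtered max, then returns the distance by arithmetic.
import Mathlib
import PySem

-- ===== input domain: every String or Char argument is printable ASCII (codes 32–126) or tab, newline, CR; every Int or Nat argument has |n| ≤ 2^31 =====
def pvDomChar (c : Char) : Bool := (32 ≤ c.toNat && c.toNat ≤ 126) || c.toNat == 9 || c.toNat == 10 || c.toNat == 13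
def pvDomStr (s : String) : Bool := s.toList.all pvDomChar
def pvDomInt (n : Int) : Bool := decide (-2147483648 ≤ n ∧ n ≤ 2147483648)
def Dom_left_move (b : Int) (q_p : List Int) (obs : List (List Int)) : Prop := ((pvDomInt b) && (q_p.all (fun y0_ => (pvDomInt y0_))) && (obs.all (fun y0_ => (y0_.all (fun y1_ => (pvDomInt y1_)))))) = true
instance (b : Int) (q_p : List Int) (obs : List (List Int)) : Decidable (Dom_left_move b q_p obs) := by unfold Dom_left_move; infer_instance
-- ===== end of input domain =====

-- B replaces A's square-by-square leftward walk (columns × obstacles) with one pass over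
-- obs computing the nearest blocking column, then pure arithmetic (objective: faster).

-- ===== PORT A =====
-- the while-loop of A: state (q_position, m, i); inner while over obs sets i to 1 on a match
def leftLoopA (obs : List (List Int)) (qpos : List Int) (m i : Int) : Int :=
  if 1 < i then
    let qpos' := qpos.set 1 (qpos.getD 1 0 - 1)
    let hit := obs.foldl (fun acc o => acc || (o == qpos')) false
    let i' := if hit then (1 : Int) else i
    let m' := if i' = 1 then m else m + 1
    leftLoopA obs qpos' m' (i' - 1)
  else m
termination_by i.toNat
decreasing_by
  rename_i h
  split <;> omega

def left_move (b : Int) (q_p : List Int) (obs : List (List Int)) : Int :=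
  match PySem.List.pyGet? q_p 1 with          -- i = q_p[1]; none = IndexError, excluded by Pre_
  | none => 0
  | some i0 => leftLoopA obs q_p 0 i0

-- ===== PORT B =====
def left_move_alt (b : Int) (q_p : List Int) (obs : List (List Int)) : Int :=
  let start := q_p.getD 1 0                   -- q_p[1]; in range under Pre_
  let nearest := obs.foldl (fun n o =>
    if o.length = q_p.length ∧ 1 ≤ o.getD 1 0 ∧ o.getD 1 0 < start ∧ n < o.getD 1 0 then
      (if o = q_p.take 1 ++ [o.getD 1 0] ++ q_p.drop 2 then o.getD 1 0 else n)
    else n) 0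
  max (start - 1 - nearest) 0

-- ===== PRECONDITION & SPEC =====
-- Pre_: A raises IndexError at q_p[1] when q_p has fewer than 2 elements (B raises there too).
def Pre_left_move (b : Int) (q_p : List Int) (obs : List (List Int)) : Prop := 2 ≤ q_p.length
instance (b : Int) (q_p : List Int) (obs : List (List Int)) : Decidable (Pre_left_move b q_p obs) := by unfold Pre_left_move; infer_instance
def pvWitness_left_move : Int × List Int × List (List Int) := (8, [4, 6], [[4, 3], [2, 2]])

def Spec_left_move (b : Int) (q_p : List Int) (obs : List (List Int)) (out : Int) : Prop := out = left_move_alt b q_p obs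
instance (b : Int) (q_p : List Int) (obs : List (List Int)) (out : Int) : Decidable (Spec_left_move b q_p obs out) := by unfold Spec_left_move; infer_instance

-- ===== CLAIM (what is proved, stated in full; the proofs are below) =====
def Claim_equal_left_move : Prop := ∀ (b : Int) (q_p : List Int) (obs : List (List Int)), Dom_left_move b q_p obs → Pre_left_move b q_p obs → Spec_left_move b q_p obs (left_move b q_p obs)

-- ===== LEMMAS AND PROOFS =====

-- the greatest blocking column c (obstacle = q_p with column c, 1 ≤ c < bnd), 0 if none
def maxBlk (q_p : List Int) (bnd : Int) : List (List Int) → Int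
  | [] => 0
  | o :: t =>
      max (if o = q_p.set 1 (o.getD 1 0) ∧ 1 ≤ o.getD 1 0 ∧ o.getD 1 0 < bnd then o.getD 1 0 else 0)
          (maxBlk q_p bnd t)

theorem maxBlk_cases (q_p : List Int) (bnd : Int) (obs : List (List Int)) :
    maxBlk q_p bnd obs = 0 ∨ (1 ≤ maxBlk q_p bnd obs ∧ maxBlk q_p bnd obs < bnd) := by
  induction obs with
  | nil => left; rfl
  | cons o t ih =>
      simp only [maxBlk]
      split
      · rename_i h; rcases ih with h' | h' <;> omega
      · rcases ih with h' | h' <;> omega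

theorem maxBlk_nonneg (q_p : List Int) (bnd : Int) (obs : List (List Int)) :
    0 ≤ maxBlk q_p bnd obs := by
  rcases maxBlk_cases q_p bnd obs with h | h <;> omega

theorem maxBlk_of_le_one (q_p : List Int) (bnd : Int) (obs : List (List Int)) (h : bnd ≤ 1) :
    maxBlk q_p bnd obs = 0 := by
  rcases maxBlk_cases q_p bnd obs with h' | h' <;> omega

theorem getD_set_self (l : List Int) (c : Int) (h : 1 < l.length) :
    (l.set 1 c).getD 1 0 = c := by
  rw [List.getD_eq_getElem _ _ (by simpa using h)]
  simp

theorem le_maxBlk_of_mem (q_p : List Int) (bnd c : Int) (obs : List (List Int))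
    (h2 : 2 ≤ q_p.length)
    (hmem : q_p.set 1 c ∈ obs) (h1 : 1 ≤ c) (hlt : c < bnd) :
    c ≤ maxBlk q_p bnd obs := by
  induction obs with
  | nil => cases hmem
  | cons o t ih =>
      simp only [maxBlk]
      rcases List.mem_cons.mp hmem with h | h
      · subst h
        have hg : ((q_p.set 1 c).getD 1 0) = c := getD_set_self q_p c (by omega)
        simp only [hg]
        rw [if_pos ⟨trivial, h1, hlt⟩]
        omega
      · have := ih h; omega

theorem maxBlk_pred (q_p : List Int) (i : Int) (obs : List (List Int))
    (h2 : 2 ≤ q_p.length) (hnm : q_p.set 1 (i - 1) ∉ obs) :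
    maxBlk q_p i obs = maxBlk q_p (i - 1) obs := by
  induction obs with
  | nil => rfl
  | cons o t ih =>
      have hto : q_p.set 1 (i - 1) ∉ t := fun h => hnm (List.mem_cons_of_mem _ h)
      have hho : o ≠ q_p.set 1 (i - 1) := fun h => hnm (h ▸ List.mem_cons_self)
      simp only [maxBlk, ih hto]
      congr 1
      by_cases hP : o = q_p.set 1 (o.getD 1 0)
      · have hne : o.getD 1 0 ≠ i - 1 := by
          intro hc; exact hho (by rw [hP, hc])
        by_cases hc1 : 1 ≤ o.getD 1 0
        · by_cases hci : o.getD 1 0 < i - 1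
          · rw [if_pos ⟨hP, hc1, by omega⟩, if_pos ⟨hP, hc1, hci⟩]
          · rw [if_neg (by rintro ⟨_, _, h⟩; omega), if_neg (by rintro ⟨_, _, h⟩; omega)]
        · rw [if_neg (by rintro ⟨_, h, _⟩; omega), if_neg (by rintro ⟨_, h, _⟩; omega)]
      · rw [if_neg (by rintro ⟨h, _⟩; exact hP h), if_neg (by rintro ⟨h, _⟩; exact hP h)]

theorem set_eq_take_cons_drop (q_p : List Int) (c : Int) (h2 : 2 ≤ q_p.length) :
    q_p.set 1 c = q_p.take 1 ++ [c] ++ q_p.drop 2 := by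
  match q_p, h2 with
  | a :: b :: t, _ => simp [List.set]

theorem hit_iff (obs : List (List Int)) (x : List Int) :
    ∀ acc : Bool, obs.foldl (fun acc o => acc || (o == x)) acc = (acc || decide (x ∈ obs)) := by
  induction obs with
  | nil => intro acc; simp
  | cons o t ih =>
      intro acc
      simp only [List.foldl_cons, ih, List.mem_cons]
      by_cases h : o = x
      · subst h; simp
      · have hx : (x = o ∨ x ∈ t) ↔ x ∈ t := by
          constructor
          · rintro (hc | hc)
            · exact absurd hc.symm h
            · exact hc
          · exact Or.inr
        rw [beq_eq_false_iff_ne.mpr h]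
        simp [hx]

theorem foldB_eq (q_p : List Int) (start : Int) (h2 : 2 ≤ q_p.length) (obs : List (List Int)) :
    ∀ n : Int, 0 ≤ n →
    obs.foldl (fun n o =>
      if o.length = q_p.length ∧ 1 ≤ o.getD 1 0 ∧ o.getD 1 0 < start ∧ n < o.getD 1 0 then
        (if o = q_p.take 1 ++ [o.getD 1 0] ++ q_p.drop 2 then o.getD 1 0 else n)
      else n) n = max n (maxBlk q_p start obs) := by
  induction obs with
  | nil => intro n hn; simp [maxBlk]; omega
  | cons o t ih =>
      intro n hn
      simp only [List.foldl_cons, maxBlk]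
      have hpat : (o = q_p.take 1 ++ [o.getD 1 0] ++ q_p.drop 2) ↔ o = q_p.set 1 (o.getD 1 0) := by
        rw [set_eq_take_cons_drop q_p _ h2]
      have hstep :
          (if o.length = q_p.length ∧ 1 ≤ o.getD 1 0 ∧ o.getD 1 0 < start ∧ n < o.getD 1 0 then
            (if o = q_p.take 1 ++ [o.getD 1 0] ++ q_p.drop 2 then o.getD 1 0 else n)
          else n)
          = max n (if o = q_p.set 1 (o.getD 1 0) ∧ 1 ≤ o.getD 1 0 ∧ o.getD 1 0 < start then o.getD 1 0 else 0) := by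
        by_cases hP : o = q_p.set 1 (o.getD 1 0) ∧ 1 ≤ o.getD 1 0 ∧ o.getD 1 0 < start
        · rw [if_pos hP]
          obtain ⟨ho, hc1, hcs⟩ := hP
          have hlen : o.length = q_p.length := by rw [ho]; simp
          by_cases hnc : n < o.getD 1 0
          · rw [if_pos ⟨hlen, hc1, hcs, hnc⟩, if_pos (hpat.mpr ho)]; omega
          · rw [if_neg (by rintro ⟨_, _, _, h⟩; omega)]; omega
        · rw [if_neg hP]
          split
          · rename_i hC
            split
            · rename_i ho
              exact absurd ⟨hpat.mp ho, hC.2.1, hC.2.2.1⟩ hP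
            · omega
          · omega
      rw [hstep, ih _ (by have := maxBlk_nonneg q_p start [o]; simp only [maxBlk] at this; omega)]
      omega

theorem loopA_eq (q_p : List Int) (obs : List (List Int)) (h2 : 2 ≤ q_p.length) :
    ∀ (k : Nat) (i m : Int), i.toNat ≤ k →
    leftLoopA obs (q_p.set 1 i) m i = m + max (i - 1 - maxBlk q_p i obs) 0 := by
  intro k
  induction k with
  | zero =>
      intro i m hk
      have hi : i ≤ 0 := by omega
      rw [leftLoopA.eq_def, if_neg (by omega), maxBlk_of_le_one q_p i obs (by omega)]
      omega
  | succ k ih =>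
      intro i m hk
      by_cases hi : 1 < i
      · rw [leftLoopA.eq_def, if_pos hi]
        have hlen : 1 < (q_p.set 1 i).length := by simpa using (by omega : 1 < q_p.length)
        have hq : ((q_p.set 1 i).set 1 ((q_p.set 1 i).getD 1 0 - 1)) = q_p.set 1 (i - 1) := by
          rw [getD_set_self q_p i (by omega), List.set_set]
        simp only [hq, hit_iff, Bool.false_or]
        by_cases hmem : q_p.set 1 (i - 1) ∈ obs
        · rw [decide_eq_true hmem]
          simp only [reduceIte]
          rw [leftLoopA.eq_def, if_neg (by omega)]
          have hub : maxBlk q_p i obs ≤ i - 1 := by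
            rcases maxBlk_cases q_p i obs with h | h <;> omega
          have hlb : i - 1 ≤ maxBlk q_p i obs :=
            le_maxBlk_of_mem q_p i (i - 1) obs h2 hmem (by omega) (by omega)
          omega
        · rw [decide_eq_false hmem]
          simp only [Bool.false_eq_true, if_false, if_neg (by omega : ¬ i = 1)]
          rw [ih (i - 1) (m + 1) (by omega)]
          rw [maxBlk_pred q_p i obs h2 hmem]
          have := maxBlk_cases q_p (i - 1) obs
          omega
      · rw [leftLoopA.eq_def, if_neg hi, maxBlk_of_le_one q_p i obs (by omega)]
        omega

theorem set_getD_self (q_p : List Int) (h2 : 2 ≤ q_p.length) :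
    q_p.set 1 (q_p.getD 1 0) = q_p := by
  rw [List.getD_eq_getElem _ _ (by omega)]
  simp

-- ===== VERDICT (by name: the statement is the Claim_ definition above) =====
theorem left_move_spec : Claim_equal_left_move := by
  intro b q_p obs _ hpre
  have h2 : 2 ≤ q_p.length := hpre
  have hone : (1 : Int) = ((1 : Nat) : Int) := rfl
  have hget : PySem.List.pyGet? q_p 1 = some (q_p.getD 1 0) := by
    rw [hone, PySem.List.pyGet?_natCast, List.getD_eq_getElem _ _ (by omega)]
    simp
  show left_move b q_p obs = left_move_alt b q_p obs
  unfold left_move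
  rw [hget]
  show leftLoopA obs q_p 0 (q_p.getD 1 0)
      = max (q_p.getD 1 0 - 1 - obs.foldl (fun n o =>
          if o.length = q_p.length ∧ 1 ≤ o.getD 1 0 ∧ o.getD 1 0 < q_p.getD 1 0 ∧ n < o.getD 1 0 then
            (if o = q_p.take 1 ++ [o.getD 1 0] ++ q_p.drop 2 then o.getD 1 0 else n)
          else n) 0) 0
  have hmain := loopA_eq q_p obs h2 (q_p.getD 1 0).toNat (q_p.getD 1 0) 0 (le_refl _)
  rw [set_getD_self q_p h2] at hmain
  rw [hmain, foldB_eq q_p (q_p.getD 1 0) h2 obs 0 (le_refl 0)]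
  have := maxBlk_nonneg q_p (q_p.getD 1 0) obs
  omega
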